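-- pv_equiv track=rewrite | github.com/same4869/whoRu | run_channel_downloader.py | find_best_subtitle_language
-- ===== SOURCE A (Python) =====
-- def find_best_subtitle_language(subtitles, automatic_captions):
--     """
--     根据优先级查找最佳字幕语言
--     优先级：简体中文 > 繁体中文 > 英文
--     """
--     # 定义语言优先级
--     priority_languages = ['zh-CN', 'zh-Hans', 'zh', 'zh-TW', 'zh-Hant', 'en']
--
--     # 合并所有可用字幕
--     all_subtitles = {}
--     if subtitles:
--         all_subtitles.update(subtitles)
--     if automatic_captions:
--         # 自动字幕标记为较低优先级
--         for lang, subs in automatic_captions.items():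
--             if lang not in all_subtitles:  # 优先使用人工字幕
--                 all_subtitles[lang] = subs
--
--     # 按优先级查找
--     for lang in priority_languages:
--         if lang in all_subtitles:
--             return lang, '人工字幕' if (subtitles and lang in subtitles) else '自动字幕'
--
--     return None, None
-- ===== SOURCE B (Python) =====
-- def find_best_subtitle_language(subtitles, automatic_captions):
--     # Simpler: no merged dict; probe each source directly in priority order,
--     # human subtitles taking precedence over automatic captions per language.
--     for lang in ('zh-CN', 'zh-Hans', 'zh', 'zh-TW', 'zh-Hant', 'en'):
--         if subtitles and lang in subtitles:
--             return lang, '人工字幕'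
--         if automatic_captions and lang in automatic_captions:
--             return lang, '自动字幕'
--     return None, None
-- ===== Notes on version B (the rewrite author's own statement) =====
-- stated objective: simpler
-- what changed: Drops the merged all_subtitles dict: B probes the two source dicts directly for each priority language (human first, then automatic) instead of building a combined lookup table and then scanning it.
import Mathlib
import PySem

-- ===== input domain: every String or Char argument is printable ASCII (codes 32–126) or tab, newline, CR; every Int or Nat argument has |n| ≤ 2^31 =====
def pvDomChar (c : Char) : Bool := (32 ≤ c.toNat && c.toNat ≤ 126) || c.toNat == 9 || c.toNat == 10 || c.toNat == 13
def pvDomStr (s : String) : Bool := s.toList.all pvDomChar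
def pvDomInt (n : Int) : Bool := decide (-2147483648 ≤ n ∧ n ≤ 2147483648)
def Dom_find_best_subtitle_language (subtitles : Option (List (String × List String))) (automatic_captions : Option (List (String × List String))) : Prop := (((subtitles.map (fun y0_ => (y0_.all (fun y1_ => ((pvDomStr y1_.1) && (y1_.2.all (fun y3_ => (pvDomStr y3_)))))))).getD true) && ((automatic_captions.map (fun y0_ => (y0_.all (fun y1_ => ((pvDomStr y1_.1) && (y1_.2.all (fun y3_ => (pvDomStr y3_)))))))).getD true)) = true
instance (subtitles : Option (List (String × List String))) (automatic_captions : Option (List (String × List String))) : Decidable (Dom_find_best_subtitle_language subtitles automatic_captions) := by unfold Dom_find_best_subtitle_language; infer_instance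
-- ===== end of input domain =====

-- B drops A's merged all_subtitles dict and probes the two source dicts directly per priority language (simpler; return value only, no mutation).


-- ===== PORT A =====

-- Python truthiness of an Optional[dict]: None and {} are falsy
def pvTruthy (o : Option (List (String × List String))) : Bool :=
  match o with
  | none => false
  | some l => !l.isEmpty

-- 'lang in d' on the raw dict argument (key membership of the association list)
def pvHasKey (o : Option (List (String × List String))) (k : String) : Bool :=
  (o.getD []).any (fun p => p.1 == k)

-- the 'for lang in priority_languages' loop of A
def pvLoopA (subtitles : Option (List (String × List String)))
    (all : PySem.Dict String (List String)) : List String → Option String × Option String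
  | [] => (none, none)
  | l :: rest =>
    if all.contains l then
      (some l, some (if pvTruthy subtitles && pvHasKey subtitles l then "人工字幕" else "自动字幕"))
    else pvLoopA subtitles all rest

def find_best_subtitle_language (subtitles : Option (List (String × List String))) (automatic_captions : Option (List (String × List String))) : Option String × Option String :=
  let priority_languages := ["zh-CN", "zh-Hans", "zh", "zh-TW", "zh-Hant", "en"]
  let all0 : PySem.Dict String (List String) := PySem.Dict.empty
  let all1 := if pvTruthy subtitles then
      (subtitles.getD []).foldl (fun d p => d.insert p.1 p.2) all0
    else all0
  let all2 := if pvTruthy automatic_captions then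
      (automatic_captions.getD []).foldl
        (fun d p => if d.contains p.1 = false then d.insert p.1 p.2 else d) all1
    else all1
  pvLoopA subtitles all2 priority_languages

-- ===== PORT B =====

-- direct probe of both sources per priority language, human first
def pvLoopB (subtitles : Option (List (String × List String)))
    (automatic_captions : Option (List (String × List String))) :
    List String → Option String × Option String
  | [] => (none, none)
  | l :: rest =>
    if pvTruthy subtitles && pvHasKey subtitles l then (some l, some "人工字幕")
    else if pvTruthy automatic_captions && pvHasKey automatic_captions l then (some l, some "自动字幕")
    else pvLoopB subtitles automatic_captions rest

def find_best_subtitle_language_alt (subtitles : Option (List (String × List String))) (automatic_captions : Option (List (String × List String))) : Option String × Option String :=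
  pvLoopB subtitles automatic_captions ["zh-CN", "zh-Hans", "zh", "zh-TW", "zh-Hant", "en"]

-- ===== PRECONDITION & SPEC =====
def Spec_find_best_subtitle_language (subtitles : Option (List (String × List String))) (automatic_captions : Option (List (String × List String))) (out : Option String × Option String) : Prop := out = find_best_subtitle_language_alt subtitles automatic_captions
instance (subtitles : Option (List (String × List String))) (automatic_captions : Option (List (String × List String))) (out : Option String × Option String) : Decidable (Spec_find_best_subtitle_language subtitles automatic_captions out) := by unfold Spec_find_best_subtitle_language; infer_instance

-- ===== CLAIM (what is proved, stated in full; the proofs are below) =====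
def Claim_equal_find_best_subtitle_language : Prop := ∀ (subtitles : Option (List (String × List String))) (automatic_captions : Option (List (String × List String))), Dom_find_best_subtitle_language subtitles automatic_captions → Spec_find_best_subtitle_language subtitles automatic_captions (find_best_subtitle_language subtitles automatic_captions)

-- ===== LEMMAS AND PROOFS =====

-- contains through A's unconditional-insert loop (dict.update)
theorem pv_contains_foldl_insert (xs : List (String × List String))
    (d : PySem.Dict String (List String)) (k : String) :
    ((xs.foldl (fun d p => d.insert p.1 p.2) d).contains k)
      = (d.contains k || xs.any (fun p => p.1 == k)) := by
  induction xs generalizing d with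
  | nil => simp
  | cons p rest ih =>
    simp only [List.foldl_cons, ih, PySem.Dict.contains_insert, List.any_cons,
      BEq.comm (a := k) (b := p.1)]
    cases (p.1 == k) <;> simp

-- contains through A's insert-if-absent loop
theorem pv_contains_foldl_insert_if (xs : List (String × List String))
    (d : PySem.Dict String (List String)) (k : String) :
    ((xs.foldl (fun d p => if d.contains p.1 = false then d.insert p.1 p.2 else d) d).contains k)
      = (d.contains k || xs.any (fun p => p.1 == k)) := by
  induction xs generalizing d with
  | nil => simp
  | cons p rest ih =>
    simp only [List.foldl_cons, List.any_cons]
    by_cases hc : d.contains p.1 = false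
    · simp only [hc, if_true, ih, PySem.Dict.contains_insert,
        BEq.comm (a := k) (b := p.1)]
      cases (p.1 == k) <;> simp
    · simp only [hc, ih]
      by_cases hk : p.1 = k
      · subst hk; simp_all
      · simp [show (p.1 == k) = false from beq_eq_false_iff_ne.mpr hk]

-- characterization of membership in A's merged dict
theorem pv_contains_all2 (subtitles automatic_captions : Option (List (String × List String)))
    (k : String) :
    (((if pvTruthy automatic_captions then
        (automatic_captions.getD []).foldl
          (fun d p => if d.contains p.1 = false then d.insert p.1 p.2 else d)
          (if pvTruthy subtitles then
            (subtitles.getD []).foldl (fun d p => d.insert p.1 p.2) PySem.Dict.empty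
          else PySem.Dict.empty)
      else (if pvTruthy subtitles then
            (subtitles.getD []).foldl (fun d p => d.insert p.1 p.2) PySem.Dict.empty
          else PySem.Dict.empty)).contains k))
    = ((pvTruthy subtitles && pvHasKey subtitles k)
        || (pvTruthy automatic_captions && pvHasKey automatic_captions k)) := by
  by_cases hs : pvTruthy subtitles = true <;> by_cases ha : pvTruthy automatic_captions = true <;>
    simp [hs, ha, pv_contains_foldl_insert, pv_contains_foldl_insert_if, pvHasKey]

-- the two priority loops agree whenever 'contains' on the merged dict has the merged characterization
theorem pv_loops_eq (subtitles automatic_captions : Option (List (String × List String)))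
    (all : PySem.Dict String (List String))
    (h : ∀ k, all.contains k
        = ((pvTruthy subtitles && pvHasKey subtitles k)
            || (pvTruthy automatic_captions && pvHasKey automatic_captions k)))
    (ls : List String) :
    pvLoopA subtitles all ls = pvLoopB subtitles automatic_captions ls := by
  induction ls with
  | nil => rfl
  | cons l rest ih =>
    simp only [pvLoopA, pvLoopB, h l]
    by_cases hs : (pvTruthy subtitles && pvHasKey subtitles l) = true
    · simp [hs]
    · by_cases ha : (pvTruthy automatic_captions && pvHasKey automatic_captions l) = true
      · simp [hs, ha]
      · simp [hs, ha, ih]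

-- ===== VERDICT (by name: the statement is the Claim_ definition above) =====
theorem find_best_subtitle_language_spec : Claim_equal_find_best_subtitle_language := by
  intro subtitles automatic_captions _dom
  unfold Spec_find_best_subtitle_language find_best_subtitle_language find_best_subtitle_language_alt
  exact pv_loops_eq subtitles automatic_captions _
    (fun k => pv_contains_all2 subtitles automatic_captions k) _
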